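-- pv_equiv track=rewrite | github.com/JosCla/aoc_2025 | day_11/main.py | get_paths_to_out_2
-- ===== SOURCE A (Python) =====
-- def get_paths_to_out_2(net, curr, memo):
--     if curr == 'out':
--         # base case: we're at out
--         return (1, 0, 0, 0)
--     if curr in memo:
--         # base case: already in memo
--         return memo[curr]
--
--     # recursive case: traverse all valid paths in net
--     paths = net[curr]
--     total_nn = 0
--     total_nd = 0
--     total_fn = 0
--     total_fd = 0
--     for p in paths:
--         (nn, nd, fn, fd) = get_paths_to_out_2(net, p, memo)
--         if curr == 'dac':
--             total_nd += (nn + nd)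
--             total_fd += (fn + fd)
--         elif curr == 'fft':
--             total_fn += (nn + fn)
--             total_fd += (nd + fd)
--         else:
--             total_nn += nn
--             total_nd += nd
--             total_fn += fn
--             total_fd += fd
--     total = (total_nn, total_nd, total_fn, total_fd)
--     memo[curr] = total
--     return total
-- ===== SOURCE B (Python) =====
-- # Iterative two-phase DFS with an explicit stack of (node, ready) frames instead
-- # of A's recursion; memo receives the same entries in the same post-order.
-- def get_paths_to_out_2(net, curr, memo):
--     if curr == 'out':
--         return (1, 0, 0, 0)
--     if curr in memo:
--         return memo[curr]
--
--     stack = [(curr, False)]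
--     while stack:
--         node, ready = stack.pop()
--         if node == 'out' or node in memo:
--             continue
--         if not ready:
--             # first visit: schedule the combine pass, then the children on top
--             stack.append((node, True))
--             for p in reversed(net[node]):
--                 stack.append((p, False))
--         else:
--             # all children resolved: sum their memoized tuples componentwise,
--             # then apply the node's (linear) dac/fft transform once
--             nn = nd = fn = fd = 0
--             for p in net[node]:
--                 a, b, c, d = (1, 0, 0, 0) if p == 'out' else memo[p]
--                 nn += a
--                 nd += b
--                 fn += c
--                 fd += d
--             if node == 'dac':
--                 memo[node] = (0, nn + nd, 0, fn + fd)
--             elif node == 'fft':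
--                 memo[node] = (0, 0, nn + fn, nd + fd)
--             else:
--                 memo[node] = (nn, nd, fn, fd)
--     return memo[curr]
-- ===== Notes on version B (the rewrite author's own statement) =====
-- stated objective: alternative
-- what changed: A's memoized recursion with a per-child branching accumulator is replaced by an iterative two-phase depth-first search over an explicit stack of (node, ready) frames: the first pop schedules a combine pass and pushes the children, the ready pop sums the children's memoized tuples componentwise and applies the node's dac/fft transform once; memo gets the same entries in the same order and the return value is identical
import Mathlib
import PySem

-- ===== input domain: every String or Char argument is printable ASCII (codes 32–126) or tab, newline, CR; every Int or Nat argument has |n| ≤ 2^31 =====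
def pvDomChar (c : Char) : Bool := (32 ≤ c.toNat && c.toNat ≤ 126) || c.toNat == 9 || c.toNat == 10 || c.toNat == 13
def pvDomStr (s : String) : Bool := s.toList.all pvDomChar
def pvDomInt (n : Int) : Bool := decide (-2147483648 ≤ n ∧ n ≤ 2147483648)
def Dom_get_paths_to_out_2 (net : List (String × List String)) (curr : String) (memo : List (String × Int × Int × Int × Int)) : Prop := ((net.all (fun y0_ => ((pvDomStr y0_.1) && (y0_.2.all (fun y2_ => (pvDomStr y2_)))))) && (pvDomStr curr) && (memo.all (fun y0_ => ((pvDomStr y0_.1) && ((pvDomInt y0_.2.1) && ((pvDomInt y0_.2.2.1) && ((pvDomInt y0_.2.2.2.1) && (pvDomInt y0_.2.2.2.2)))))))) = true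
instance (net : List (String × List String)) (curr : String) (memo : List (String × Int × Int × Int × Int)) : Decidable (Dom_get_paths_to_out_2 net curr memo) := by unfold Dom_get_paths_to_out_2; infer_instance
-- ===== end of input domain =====

-- B replaces A's memoized recursion by an iterative two-phase DFS over an explicit stack of
-- (node, ready) frames; under Pre_ both mutate the Python memo identically, and the theorems
-- here are about the RETURN value only.

-- ===== PORT A =====
-- A is recursive on a graph; the port adds a fuel argument (net.length + 1, enough for any
-- acyclic run: the call stack holds distinct net keys) to make the same computation total;
-- out-of-fuel (a cyclic net, where Python A raises RecursionError) is excluded by Pre_.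
def goA (net : List (String × List String)) :
    Nat → String → List (String × Int × Int × Int × Int) →
    ((Int × Int × Int × Int) × List (String × Int × Int × Int × Int))
  | 0, _, memo => (((0 : Int), (0 : Int), (0 : Int), (0 : Int)), memo)
  | fuel + 1, curr, memo =>
    if curr == "out" then (((1 : Int), (0 : Int), (0 : Int), (0 : Int)), memo)
    else
      match (PySem.Dict.mk memo).get? curr with
      | some t => (t, memo)
      | none =>
        let paths := ((PySem.Dict.mk net).get? curr).getD []
        let st := paths.foldl
          (fun (st : (Int × Int × Int × Int) × List (String × Int × Int × Int × Int)) p =>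
            let r := goA net fuel p st.2
            let nn := r.1.1; let nd := r.1.2.1; let fn := r.1.2.2.1; let fd := r.1.2.2.2
            let t := st.1
            if curr == "dac" then
              ((t.1, t.2.1 + (nn + nd), t.2.2.1, t.2.2.2 + (fn + fd)), r.2)
            else if curr == "fft" then
              ((t.1, t.2.1, t.2.2.1 + (nn + fn), t.2.2.2 + (nd + fd)), r.2)
            else
              ((t.1 + nn, t.2.1 + nd, t.2.2.1 + fn, t.2.2.2 + fd), r.2))
          ((((0 : Int), (0 : Int), (0 : Int), (0 : Int)), memo))
        (st.1, ((PySem.Dict.mk st.2).insert curr st.1).items)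

def get_paths_to_out_2 (net : List (String × List String)) (curr : String) (memo : List (String × Int × Int × Int × Int)) : Int × Int × Int × Int :=
  (goA net (net.length + 1) curr memo).1

-- ===== PORT B =====
-- componentwise sum of two 4-tuples (B's ready pass sums the children first)
def addT (x y : Int × Int × Int × Int) : Int × Int × Int × Int :=
  (x.1 + y.1, x.2.1 + y.2.1, x.2.2.1 + y.2.2.1, x.2.2.2 + y.2.2.2)

-- the per-node dac/fft transform, applied once to the summed tuple
def tf (curr : String) (t : Int × Int × Int × Int) : Int × Int × Int × Int :=
  if curr == "dac" then ((0 : Int), t.1 + t.2.1, (0 : Int), t.2.2.1 + t.2.2.2)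
  else if curr == "fft" then ((0 : Int), (0 : Int), t.1 + t.2.2.1, t.2.1 + t.2.2.2)
  else t

-- "(1,0,0,0) if p == 'out' else memo[p]" (memo lookup total via getD; Pre_ guarantees presence)
def childVal (m : List (String × Int × Int × Int × Int)) (p : String) : Int × Int × Int × Int :=
  if p == "out" then ((1 : Int), (0 : Int), (0 : Int), (0 : Int))
  else ((PySem.Dict.mk m).get? p).getD ((0 : Int), (0 : Int), (0 : Int), (0 : Int))

-- B's ready pass: sum the memoized tuples of net[node] componentwise, then transform once
def combine (net : List (String × List String)) (m : List (String × Int × Int × Int × Int)) (node : String) : Int × Int × Int × Int :=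
  tf node ((((PySem.Dict.mk net).get? node).getD []).foldl (fun t p => addT t (childVal m p))
    (((0 : Int), (0 : Int), (0 : Int), (0 : Int))))

-- B's while loop over the explicit stack (head = top); the fuel argument is a port device
-- making the loop total — it counts pops and is never exhausted on inputs admitted by Pre_.
def stepRun (net : List (String × List String)) :
    Nat → List (String × Bool) → List (String × Int × Int × Int × Int) →
    Option (List (String × Int × Int × Int × Int))
  | _, [], m => some m
  | 0, _ :: _, _ => none
  | f + 1, (node, ready) :: st, m =>
    if node == "out" || ((PySem.Dict.mk m).get? node).isSome then
      stepRun net f st m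
    else if ready then
      stepRun net f st (((PySem.Dict.mk m).insert node (combine net m node)).items)
    else
      stepRun net f ((((PySem.Dict.mk net).get? node).getD []).map (fun p => (p, false)) ++ (node, true) :: st) m

-- fuel budget: 2*(S+2)^(L+1) pops always suffice under Pre_ (proved below)
def pvS (net : List (String × List String)) : Nat := (net.map (fun q => q.2.length)).sum

def bFuel (net : List (String × List String)) : Nat := 2 * (pvS net + 2) ^ (net.length + 1)

def get_paths_to_out_2_alt (net : List (String × List String)) (curr : String) (memo : List (String × Int × Int × Int × Int)) : Int × Int × Int × Int :=
  if curr == "out" then ((1 : Int), (0 : Int), (0 : Int), (0 : Int))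
  else
    match (PySem.Dict.mk memo).get? curr with
    | some t => t
    | none =>
      match stepRun net (bFuel net) [(curr, false)] memo with
      | some m2 => ((PySem.Dict.mk m2).get? curr).getD ((0 : Int), (0 : Int), (0 : Int), (0 : Int))
      | none => ((0 : Int), (0 : Int), (0 : Int), (0 : Int))

-- ===== PRECONDITION & SPEC =====
-- a node at which the traversal stops without touching net: 'out' or already memoized
def pvStops (memo : List (String × Int × Int × Int × Int)) (n : String) : Bool :=
  n == "out" || ((PySem.Dict.mk memo).get? n).isSome

def pvSuccs (net : List (String × List String)) (n : String) : List String :=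
  ((PySem.Dict.mk net).get? n).getD []

-- bounded termination of the (static) graph walk: within k steps every path from n
-- reaches a stop node, and every non-stop node on the way is a key of net
def pvTerm (net : List (String × List String)) (memo : List (String × Int × Int × Int × Int)) : Nat → String → Bool
  | 0, n => pvStops memo n
  | k + 1, n => pvStops memo n ||
      (((PySem.Dict.mk net).get? n).isSome && (pvSuccs net n).all (fun p => pvTerm net memo k p))

-- Pre_ excludes exactly the inputs on which Python A raises: a reachable (via non-stop nodes)
-- key missing from net (KeyError) or a reachable cycle / unbounded walk (RecursionError).
def Pre_get_paths_to_out_2 (net : List (String × List String)) (curr : String) (memo : List (String × Int × Int × Int × Int)) : Prop :=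
  pvTerm net memo net.length curr = true
instance (net : List (String × List String)) (curr : String) (memo : List (String × Int × Int × Int × Int)) : Decidable (Pre_get_paths_to_out_2 net curr memo) := by unfold Pre_get_paths_to_out_2; infer_instance

def pvWitness_get_paths_to_out_2 : (List (String × List String)) × String × (List (String × Int × Int × Int × Int)) :=
  ([("a", ["out", "out"])], "a", [])

def Spec_get_paths_to_out_2 (net : List (String × List String)) (curr : String) (memo : List (String × Int × Int × Int × Int)) (out : Int × Int × Int × Int) : Prop := out = get_paths_to_out_2_alt net curr memo
instance (net : List (String × List String)) (curr : String) (memo : List (String × Int × Int × Int × Int)) (out : Int × Int × Int × Int) : Decidable (Spec_get_paths_to_out_2 net curr memo out) := by unfold Spec_get_paths_to_out_2; infer_instance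

-- ===== CLAIM (what is proved, stated in full; the proofs are below) =====
def Claim_equal_get_paths_to_out_2 : Prop := ∀ (net : List (String × List String)) (curr : String) (memo : List (String × Int × Int × Int × Int)), Dom_get_paths_to_out_2 net curr memo → Pre_get_paths_to_out_2 net curr memo → Spec_get_paths_to_out_2 net curr memo (get_paths_to_out_2 net curr memo)

-- ===== LEMMAS AND PROOFS =====

-- m extends m0: every association present in m0 is present (first match) in m
def mExt (m0 m : List (String × Int × Int × Int × Int)) : Prop :=
  ∀ k v, (PySem.Dict.mk m0).get? k = some v → (PySem.Dict.mk m).get? k = some v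

-- chains of non-stop nodes along net edges, with their length
inductive pvChain (net : List (String × List String)) (m0 : List (String × Int × Int × Int × Int)) : Nat → String → String → Prop where
  | refl (n : String) (h : pvStops m0 n = false) : pvChain net m0 0 n n
  | step (n p q : String) (j : Nat) (hn : pvStops m0 n = false) (hp : p ∈ pvSuccs net n)
      (h : pvChain net m0 j p q) : pvChain net m0 (j + 1) n q

-- [rec(p) for p in ps] threading the memo left to right (values, final memo)
def mapGo (g : String → List (String × Int × Int × Int × Int) →
      ((Int × Int × Int × Int) × List (String × Int × Int × Int × Int))) :
    List String → List (String × Int × Int × Int × Int) →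
    (List (Int × Int × Int × Int) × List (String × Int × Int × Int × Int))
  | [], m => ([], m)
  | p :: ps, m =>
    let r := g p m
    let rest := mapGo g ps r.2
    (r.1 :: rest.1, rest.2)

theorem mExt_refl (m : List (String × Int × Int × Int × Int)) : mExt m m := fun _ _ h => h

theorem mExt_trans {a b c : List (String × Int × Int × Int × Int)} (h1 : mExt a b) (h2 : mExt b c) : mExt a c :=
  fun k v h => h2 k v (h1 k v h)

theorem mExt_insert_fresh {m : List (String × Int × Int × Int × Int)} {n : String}
    (hn : (PySem.Dict.mk m).get? n = none) (t : Int × Int × Int × Int) :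
    mExt m (((PySem.Dict.mk m).insert n t).items) := by
  intro k v h
  show ((PySem.Dict.mk m).insert n t).get? k = some v
  rw [PySem.Dict.get?_insert]
  split
  · rename_i hk; rw [hk] at h; rw [h] at hn; cases hn
  · exact h

theorem stepRun_nil (net : List (String × List String)) (f : Nat) (m : List (String × Int × Int × Int × Int)) :
    stepRun net f [] m = some m := by
  cases f <;> rfl

-- A's per-child accumulation step, used only to restate A's fold in the proofs
def accStep (curr : String) (t r : Int × Int × Int × Int) : Int × Int × Int × Int :=
  if curr == "dac" then (t.1, t.2.1 + (r.1 + r.2.1), t.2.2.1, t.2.2.2 + (r.2.2.1 + r.2.2.2))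
  else if curr == "fft" then (t.1, t.2.1, t.2.2.1 + (r.1 + r.2.2.1), t.2.2.2 + (r.2.1 + r.2.2.2))
  else (t.1 + r.1, t.2.1 + r.2.1, t.2.2.1 + r.2.2.1, t.2.2.2 + r.2.2.2)

def sumT (vs : List (Int × Int × Int × Int)) : Int × Int × Int × Int :=
  vs.foldr addT (((0 : Int), (0 : Int), (0 : Int), (0 : Int)))

theorem addT_zero_left (x : Int × Int × Int × Int) :
    addT (((0 : Int), (0 : Int), (0 : Int), (0 : Int))) x = x := by
  simp [addT]

theorem addT_zero_right (x : Int × Int × Int × Int) :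
    addT x (((0 : Int), (0 : Int), (0 : Int), (0 : Int))) = x := by
  simp [addT]

theorem addT_assoc (x y z : Int × Int × Int × Int) : addT (addT x y) z = addT x (addT y z) := by
  simp [addT]; omega

theorem tf_zero (c : String) :
    tf c (((0 : Int), (0 : Int), (0 : Int), (0 : Int))) = (((0 : Int), (0 : Int), (0 : Int), (0 : Int))) := by
  simp only [tf]; split_ifs <;> rfl

theorem tf_add (c : String) (x y : Int × Int × Int × Int) : tf c (addT x y) = addT (tf c x) (tf c y) := by
  simp only [tf]; split_ifs <;> simp [addT] <;> omega

theorem accStep_eq (c : String) (t v : Int × Int × Int × Int) : accStep c t v = addT t (tf c v) := by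
  simp only [accStep, tf, addT]; split_ifs <;> simp

theorem foldl_accStep (c : String) :
    ∀ (vs : List (Int × Int × Int × Int)) (acc : Int × Int × Int × Int),
      vs.foldl (accStep c) acc = addT acc (tf c (sumT vs)) := by
  intro vs
  induction vs with
  | nil => intro acc; simp [sumT, tf_zero, addT_zero_right]
  | cons v vs ih =>
    intro acc
    rw [List.foldl_cons, ih, accStep_eq]
    simp only [sumT, List.foldr_cons]
    rw [show vs.foldr addT (((0 : Int), (0 : Int), (0 : Int), (0 : Int))) = sumT vs from rfl,
      tf_add, addT_assoc]

theorem foldl_addT :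
    ∀ (vs : List (Int × Int × Int × Int)) (acc : Int × Int × Int × Int),
      vs.foldl addT acc = addT acc (sumT vs) := by
  intro vs
  induction vs with
  | nil => intro acc; simp [sumT, addT_zero_right]
  | cons v vs ih =>
    intro acc
    rw [List.foldl_cons, ih]
    simp only [sumT, List.foldr_cons]
    rw [show vs.foldr addT (((0 : Int), (0 : Int), (0 : Int), (0 : Int))) = sumT vs from rfl,
      addT_assoc]

-- A's literal fold over paths, rewritten through accStep / mapGo
theorem foldA_eq (g : String → List (String × Int × Int × Int × Int) →
      ((Int × Int × Int × Int) × List (String × Int × Int × Int × Int)))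
    (curr : String) :
    ∀ (ps : List String) (acc : Int × Int × Int × Int) (m : List (String × Int × Int × Int × Int)),
      ps.foldl
        (fun (st : (Int × Int × Int × Int) × List (String × Int × Int × Int × Int)) p =>
          let r := g p st.2
          let nn := r.1.1; let nd := r.1.2.1; let fn := r.1.2.2.1; let fd := r.1.2.2.2
          let t := st.1
          if curr == "dac" then
            ((t.1, t.2.1 + (nn + nd), t.2.2.1, t.2.2.2 + (fn + fd)), r.2)
          else if curr == "fft" then
            ((t.1, t.2.1, t.2.2.1 + (nn + fn), t.2.2.2 + (nd + fd)), r.2)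
          else
            ((t.1 + nn, t.2.1 + nd, t.2.2.1 + fn, t.2.2.2 + fd), r.2))
        (acc, m)
      = ((mapGo g ps m).1.foldl (accStep curr) acc, (mapGo g ps m).2) := by
  have hfun :
      (fun (st : (Int × Int × Int × Int) × List (String × Int × Int × Int × Int)) p =>
          let r := g p st.2
          let nn := r.1.1; let nd := r.1.2.1; let fn := r.1.2.2.1; let fd := r.1.2.2.2
          let t := st.1
          if curr == "dac" then
            ((t.1, t.2.1 + (nn + nd), t.2.2.1, t.2.2.2 + (fn + fd)), r.2)
          else if curr == "fft" then
            ((t.1, t.2.1, t.2.2.1 + (nn + fn), t.2.2.2 + (nd + fd)), r.2)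
          else
            ((t.1 + nn, t.2.1 + nd, t.2.2.1 + fn, t.2.2.2 + fd), r.2))
      = (fun st p => (accStep curr st.1 (g p st.2).1, (g p st.2).2)) := by
    funext st p
    simp only [accStep]
    split_ifs <;> rfl
  rw [hfun]
  clear hfun
  intro ps
  induction ps with
  | nil => intro acc m; simp [mapGo]
  | cons p ps ih =>
    intro acc m
    rw [List.foldl_cons, ih]
    simp [mapGo]

-- bounded termination bounds the length of every non-stop chain
theorem chainBound (net : List (String × List String)) (m0 : List (String × Int × Int × Int × Int)) :
    ∀ (j : Nat) (n q : String), pvChain net m0 j n q →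
      ∀ k, pvTerm net m0 k n = true → j ≤ k := by
  intro j n q hc
  induction hc with
  | refl n h => intro k _; exact Nat.zero_le k
  | step n p q j hn hp h ih =>
    intro k hk
    cases k with
    | zero => simp only [pvTerm] at hk; rw [hn] at hk; cases hk
    | succ k' =>
      simp only [pvTerm, Bool.or_eq_true, Bool.and_eq_true, List.all_eq_true] at hk
      rcases hk with hk | ⟨_, hall⟩
      · rw [hn] at hk; cases hk
      · exact Nat.succ_le_succ (ih k' (hall p hp))

theorem chainTrans (net : List (String × List String)) (m0 : List (String × Int × Int × Int × Int)) :
    ∀ (i : Nat) (n p : String), pvChain net m0 i n p →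
      ∀ (j : Nat) (q : String), pvChain net m0 j p q → pvChain net m0 (i + j) n q := by
  intro i n p hc
  induction hc with
  | refl n h => intro j q h2; simpa using h2
  | step n p q j hn hp h ih =>
    intro j2 q2 h2
    have := pvChain.step (net := net) (m0 := m0) n p q2 (j + j2) hn hp (ih j2 q2 h2)
    have harith : j + 1 + j2 = j + j2 + 1 := by omega
    rw [harith]
    exact this

-- a non-stop cycle at n contradicts pvTerm
theorem noCycle (net : List (String × List String)) (m0 : List (String × Int × Int × Int × Int))
    (n : String) (j k : Nat) (hc : pvChain net m0 (j + 1) n n)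
    (ht : pvTerm net m0 k n = true) : False := by
  have hns : pvStops m0 n = false := by cases hc with | step _ _ _ _ hn _ _ => exact hn
  have pump : ∀ t : Nat, pvChain net m0 (t * (j + 1)) n n := by
    intro t
    induction t with
    | zero => simpa using pvChain.refl (net := net) (m0 := m0) n hns
    | succ t ih =>
      have := chainTrans net m0 (t * (j + 1)) n n ih (j + 1) n hc
      have harith : (t + 1) * (j + 1) = t * (j + 1) + (j + 1) := by ring
      rw [harith]
      exact this
  have hb := chainBound net m0 ((k + 1) * (j + 1)) n n (pump (k + 1)) k ht
  have : k + 1 ≤ (k + 1) * (j + 1) := Nat.le_mul_of_pos_right _ (Nat.succ_pos j)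
  omega

theorem stepRun_cons (net : List (String × List String)) (f : Nat) (node : String) (ready : Bool)
    (st : List (String × Bool)) (m : List (String × Int × Int × Int × Int)) :
    stepRun net (f + 1) ((node, ready) :: st) m =
      if node == "out" || ((PySem.Dict.mk m).get? node).isSome then
        stepRun net f st m
      else if ready then
        stepRun net f st (((PySem.Dict.mk m).insert node (combine net m node)).items)
      else
        stepRun net f ((((PySem.Dict.mk net).get? node).getD []).map (fun p => (p, false)) ++ (node, true) :: st) m := rfl

theorem degLe (net : List (String × List String)) (n : String) :
    (((PySem.Dict.mk net).get? n).getD []).length ≤ pvS net := by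
  cases h : (PySem.Dict.mk net).get? n with
  | none => simp [pvS]
  | some l =>
    have hmem : (n, l) ∈ net := PySem.Dict.mem_items_of_get?_eq_some _ h
    have hmem2 : l.length ∈ net.map (fun q => q.2.length) :=
      List.mem_map_of_mem (f := fun q => q.2.length) hmem
    simpa [pvS] using List.single_le_sum (fun x _ => Nat.zero_le x) _ hmem2

-- the bundle of facts proved about one recursion level: the run extends the memo, inserts only
-- non-stop reachable keys, memoizes its own result, and the machine simulates it in ≤ 2*(S+2)^(k+1) pops
def goodG (net : List (String × List String)) (m0 : List (String × Int × Int × Int × Int)) (k : Nat)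
    (g : String → List (String × Int × Int × Int × Int) →
      ((Int × Int × Int × Int) × List (String × Int × Int × Int × Int))) : Prop :=
  ∀ n m, mExt m0 m → pvTerm net m0 k n = true →
    mExt m (g n m).2
    ∧ (∀ q, ((PySem.Dict.mk (g n m).2).get? q).isSome = true →
        ((PySem.Dict.mk m).get? q).isSome = true ∨ ∃ j, pvChain net m0 j n q)
    ∧ (n = "out" → g n m = (((1 : Int), (0 : Int), (0 : Int), (0 : Int)), m))
    ∧ (n ≠ "out" → (PySem.Dict.mk (g n m).2).get? n = some (g n m).1)
    ∧ ∃ c ≤ 2 * (pvS net + 2) ^ (k + 1), ∀ st mf,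
        stepRun net (c + mf) ((n, false) :: st) m = stepRun net mf st (g n m).2

-- the same facts lifted to a left-to-right run over a list of children
theorem listP (net : List (String × List String)) (m0 : List (String × Int × Int × Int × Int)) (k : Nat)
    (g : String → List (String × Int × Int × Int × Int) →
      ((Int × Int × Int × Int) × List (String × Int × Int × Int × Int)))
    (hg : goodG net m0 k g) :
    ∀ (cs : List String) (m : List (String × Int × Int × Int × Int)),
      mExt m0 m → (∀ p ∈ cs, pvTerm net m0 k p = true) →
      mExt m (mapGo g cs m).2
      ∧ (∀ q, ((PySem.Dict.mk (mapGo g cs m).2).get? q).isSome = true →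
          ((PySem.Dict.mk m).get? q).isSome = true ∨ ∃ p ∈ cs, ∃ j, pvChain net m0 j p q)
      ∧ (∀ mfin, mExt (mapGo g cs m).2 mfin → (mapGo g cs m).1 = cs.map (fun p => childVal mfin p))
      ∧ ∃ c ≤ cs.length * (2 * (pvS net + 2) ^ (k + 1)), ∀ st mf,
          stepRun net (c + mf) (cs.map (fun p => (p, false)) ++ st) m = stepRun net mf st (mapGo g cs m).2 := by
  intro cs
  induction cs with
  | nil =>
    intro m hm _
    refine ⟨mExt_refl m, fun q h => Or.inl h, fun _ _ => rfl, 0, Nat.zero_le _, fun st mf => ?_⟩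
    simp [mapGo]
  | cons p ps ihps =>
    intro m hm hall
    obtain ⟨he1, hk1, hout1, hself1, c1, hc1, hs1⟩ := hg p m hm (hall p (List.mem_cons_self))
    have hm1 : mExt m0 (g p m).2 := mExt_trans hm he1
    obtain ⟨he2, hk2, hv2, c2, hc2, hs2⟩ := ihps (g p m).2 hm1 (fun q hq => hall q (List.mem_cons_of_mem p hq))
    have hrw : mapGo g (p :: ps) m = ((g p m).1 :: (mapGo g ps (g p m).2).1, (mapGo g ps (g p m).2).2) := rfl
    rw [hrw]
    refine ⟨mExt_trans he1 he2, ?_, ?_, ?_⟩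
    · intro q h
      rcases hk2 q h with h1 | ⟨p', hp', j, hch⟩
      · rcases hk1 q h1 with h2 | ⟨j, hch⟩
        · exact Or.inl h2
        · exact Or.inr ⟨p, List.mem_cons_self, j, hch⟩
      · exact Or.inr ⟨p', List.mem_cons_of_mem p hp', j, hch⟩
    · intro mfin hfin
      have hfin1 : mExt (g p m).2 mfin := mExt_trans he2 hfin
      have hv : (g p m).1 = childVal mfin p := by
        by_cases hpo : p = "out"
        · subst hpo
          rw [hout1 rfl]
          simp [childVal]
        · have hsome := hfin1 p (g p m).1 (hself1 hpo)
          have hpb : (p == "out") = false := by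
            simpa using hpo
          simp [childVal, hpb, hsome]
      simp only [List.map_cons]
      rw [hv2 mfin hfin, hv]
    · refine ⟨c1 + c2, ?_, ?_⟩
      · have : (p :: ps).length * (2 * (pvS net + 2) ^ (k + 1))
            = ps.length * (2 * (pvS net + 2) ^ (k + 1)) + 2 * (pvS net + 2) ^ (k + 1) := by
          simp [List.length_cons, Nat.succ_mul]
        omega
      · intro st mf
        have ha : c1 + c2 + mf = c1 + (c2 + mf) := by omega
        simp only [List.map_cons, List.cons_append]
        rw [ha, hs1 (ps.map (fun p => (p, false)) ++ st) (c2 + mf), hs2 st mf]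

-- the main simulation lemma: under pvTerm k, goA with fuel k+1 computes completely and
-- the stack machine simulates it (same memo effect, memoized result)
-- the base-case behaviour shared by every level: 'out' and already-memoized nodes
theorem stopCur (net : List (String × List String)) (m0 : List (String × Int × Int × Int × Int))
    (f : Nat) (n : String) (m : List (String × Int × Int × Int × Int))
    (h : (n == "out") = true ∨ ∃ t, (PySem.Dict.mk m).get? n = some t) :
    mExt m (goA net (f + 1) n m).2
    ∧ (∀ q, ((PySem.Dict.mk (goA net (f + 1) n m).2).get? q).isSome = true →
        ((PySem.Dict.mk m).get? q).isSome = true ∨ ∃ j, pvChain net m0 j n q)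
    ∧ (n = "out" → goA net (f + 1) n m = (((1 : Int), (0 : Int), (0 : Int), (0 : Int)), m))
    ∧ (n ≠ "out" → (PySem.Dict.mk (goA net (f + 1) n m).2).get? n = some (goA net (f + 1) n m).1)
    ∧ ∃ c ≤ 2 * (pvS net + 2) ^ (f + 1), ∀ st mf,
        stepRun net (c + mf) ((n, false) :: st) m = stepRun net mf st (goA net (f + 1) n m).2 := by
  have hbound : 1 ≤ 2 * (pvS net + 2) ^ (f + 1) := by
    have := Nat.one_le_pow (f + 1) (pvS net + 2) (by omega)
    omega
  rcases h with hout | ⟨t, hmem⟩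
  · have hne : n = "out" := by simpa using hout
    have hA : goA net (f + 1) n m = (((1 : Int), (0 : Int), (0 : Int), (0 : Int)), m) := by
      simp [goA, hout]
    rw [hA]
    refine ⟨mExt_refl m, fun q h => Or.inl h, fun _ => rfl, fun hc => absurd hne hc, 1, hbound, ?_⟩
    intro st mf
    have h1 : 1 + mf = mf + 1 := by omega
    rw [h1, stepRun_cons]
    simp [hout]
  · by_cases hout : (n == "out") = true
    · have hne : n = "out" := by simpa using hout
      have hA : goA net (f + 1) n m = (((1 : Int), (0 : Int), (0 : Int), (0 : Int)), m) := by
        simp [goA, hout]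
      rw [hA]
      refine ⟨mExt_refl m, fun q h => Or.inl h, fun _ => rfl, fun hc => absurd hne hc, 1, hbound, ?_⟩
      intro st mf
      have h1 : 1 + mf = mf + 1 := by omega
      rw [h1, stepRun_cons]
      simp [hout]
    · have houtf : (n == "out") = false := by simpa using hout
      have hA : goA net (f + 1) n m = (t, m) := by
        simp [goA, houtf, hmem]
      rw [hA]
      refine ⟨mExt_refl m, fun q h => Or.inl h, ?_, fun _ => by simpa using hmem, 1, hbound, ?_⟩
      · intro hc; rw [hc] at houtf; simp at houtf
      · intro st mf
        have h1 : 1 + mf = mf + 1 := by omega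
        rw [h1, stepRun_cons]
        simp [houtf, hmem]

-- the main simulation lemma: under pvTerm k, goA with fuel k+1 computes completely and
-- the stack machine simulates it (same memo effect, memoized result)
theorem mainP (net : List (String × List String)) (m0 : List (String × Int × Int × Int × Int)) :
    ∀ k : Nat, goodG net m0 k (fun n m => goA net (k + 1) n m) := by
  intro k
  induction k with
  | zero =>
    intro n m hm hk
    beta_reduce
    have hs : pvStops m0 n = true := hk
    simp only [pvStops, Bool.or_eq_true, Option.isSome_iff_exists] at hs
    rcases hs with hout | ⟨t, hmem⟩
    · exact stopCur net m0 0 n m (Or.inl hout)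
    · exact stopCur net m0 0 n m (Or.inr ⟨t, hm n t hmem⟩)
  | succ k' ih =>
    intro n m hm hk
    beta_reduce
    by_cases hout : (n == "out") = true
    · exact stopCur net m0 (k' + 1) n m (Or.inl hout)
    · cases hcm : (PySem.Dict.mk m).get? n with
      | some t => exact stopCur net m0 (k' + 1) n m (Or.inr ⟨t, hcm⟩)
      | none =>
        -- fresh node: the real recursive case
        have houtf : (n == "out") = false := by simpa using hout
        have hn0 : pvStops m0 n = false := by
          simp only [pvStops, houtf]
          cases hm0 : (PySem.Dict.mk m0).get? n with
          | none => rfl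
          | some t => rw [hm n t hm0] at hcm; cases hcm
        have hk' := hk
        simp only [pvTerm, Bool.or_eq_true, Bool.and_eq_true, List.all_eq_true] at hk'
        rcases hk' with hstop | ⟨hnet, hall⟩
        · rw [hn0] at hstop; cases hstop
        obtain ⟨hLe, hLk, hLv, cl, hcl, hLs⟩ :=
          listP net m0 k' (fun p m => goA net (k' + 1) p m) ih
            (((PySem.Dict.mk net).get? n).getD []) m hm (fun p hp => hall p hp)
        set g := fun (p : String) (m : List (String × Int × Int × Int × Int)) => goA net (k' + 1) p m with hg
        set paths := ((PySem.Dict.mk net).get? n).getD [] with hpaths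
        set M2 := (mapGo g paths m).2 with hM2
        set V := (mapGo g paths m).1.foldl (accStep n) (((0 : Int), (0 : Int), (0 : Int), (0 : Int))) with hV
        have hA : goA net (k' + 1 + 1) n m = (V, ((PySem.Dict.mk M2).insert n V).items) := by
          conv_lhs => rw [goA]
          simp only [houtf, Bool.false_eq_true, if_false, hcm]
          rw [foldA_eq g n paths (((0 : Int), (0 : Int), (0 : Int), (0 : Int))) m]
        have hnofinal : (PySem.Dict.mk M2).get? n = none := by
          cases hfin : (PySem.Dict.mk M2).get? n with
          | none => rfl
          | some t =>
            exfalso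
            have hIs : ((PySem.Dict.mk M2).get? n).isSome = true := by rw [hfin]; rfl
            rcases hLk n hIs with h1 | ⟨p, hp, j, hch⟩
            · rw [hcm] at h1; cases h1
            · exact noCycle net m0 n j (k' + 1) (pvChain.step n p n j hn0 hp hch) hk
        have hmkitems : ∀ (d : PySem.Dict String (Int × Int × Int × Int)), PySem.Dict.mk d.items = d :=
          fun d => rfl
        refine ⟨?_, ?_, ?_, ?_, ?_⟩
        · rw [hA]
          exact mExt_trans hLe (mExt_insert_fresh hnofinal V)
        · intro q hq
          rw [hA] at hq
          simp only [hmkitems] at hq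
          rw [PySem.Dict.get?_insert] at hq
          split at hq
          · rename_i hqn
            subst hqn
            exact Or.inr ⟨0, pvChain.refl q hn0⟩
          · rcases hLk q hq with h1 | ⟨p, hp, j, hch⟩
            · exact Or.inl h1
            · exact Or.inr ⟨j + 1, pvChain.step n p q j hn0 hp hch⟩
        · intro hc; rw [hc] at houtf; simp at houtf
        · intro _
          rw [hA]
          simp only [hmkitems]
          simp [PySem.Dict.get?_insert_self]
        · refine ⟨cl + 2, ?_, ?_⟩
          · have hdeg : paths.length ≤ pvS net := degLe net n
            have hp1 : 1 ≤ (pvS net + 2) ^ (k' + 1) := Nat.one_le_pow _ _ (by omega)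
            have hpow : (pvS net + 2) ^ (k' + 1 + 1) = (pvS net + 2) ^ (k' + 1) * (pvS net + 2) :=
              pow_succ _ _
            nlinarith [hcl, hdeg, hp1]
          · intro st mf
            rw [hA]
            have h1 : cl + 2 + mf = (cl + (1 + mf)) + 1 := by omega
            rw [h1, stepRun_cons]
            simp only [houtf, hcm, Option.isSome_none, Bool.or_self, Bool.false_eq_true, if_false]
            have hcombine : combine net M2 n = V := by
              rw [hV, hLv M2 (mExt_refl M2), foldl_accStep, addT_zero_left]
              simp only [combine, ← hpaths]
              rw [← List.foldl_map (f := fun p => childVal M2 p) (g := addT), foldl_addT, addT_zero_left]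
            rw [← hpaths, hLs ((n, true) :: st) (1 + mf)]
            have h2 : 1 + mf = mf + 1 := by omega
            rw [h2, stepRun_cons]
            simp only [houtf, hnofinal, Option.isSome_none, Bool.or_self, Bool.false_eq_true,
              if_false, if_true, hcombine]

-- ===== VERDICT (by name: the statement is the Claim_ definition above) =====
theorem get_paths_to_out_2_spec : Claim_equal_get_paths_to_out_2 := by
  intro net curr memo _ hpre
  unfold Spec_get_paths_to_out_2 get_paths_to_out_2 get_paths_to_out_2_alt
  by_cases hout : (curr == "out") = true
  · obtain ⟨_, _, hA_out, _⟩ := mainP net memo net.length curr memo (mExt_refl memo) hpre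
    have hc : curr = "out" := by simpa using hout
    have hA1 : goA net (net.length + 1) curr memo = (((1 : Int), (0 : Int), (0 : Int), (0 : Int)), memo) :=
      hA_out hc
    simp [hout, hA1]
  · have houtf : (curr == "out") = false := by simpa using hout
    cases hcm : (PySem.Dict.mk memo).get? curr with
    | some t =>
      have hA1 : goA net (net.length + 1) curr memo = (t, memo) := by
        simp [goA, houtf, hcm]
      simp [houtf, hA1]
    | none =>
      obtain ⟨_, _, _, hself, c, hc, hs⟩ := mainP net memo net.length curr memo (mExt_refl memo) hpre
      have hne : curr ≠ "out" := by simpa using houtf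
      have hself' := hself hne
      have hcb : c ≤ bFuel net := by unfold bFuel; exact hc
      have h1 : bFuel net = c + (bFuel net - c) := by omega
      have hrun : stepRun net (bFuel net) [(curr, false)] memo
          = some (goA net (net.length + 1) curr memo).2 := by
        rw [h1, hs [] (bFuel net - c), stepRun_nil]
      simp only [houtf, Bool.false_eq_true, if_false, hrun]
      simp [hself']
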